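-- pv_equiv track=rewrite | github.com/mitevdirections-arch/MyData | services/api/app/modules/ai/order_draft_assist_service.py | _focus_enabled
-- ===== SOURCE A (Python) =====
-- def _focus_enabled(field_path: str, focus: set[str]) -> bool:
--     if not focus:
--         return True
--     for target in focus:
--         if field_path == target:
--             return True
--         if field_path.startswith(target + "."):
--             return True
--         if target.startswith(field_path + "."):
--             return True
--     return False
-- ===== SOURCE B (Python) =====
-- def _focus_enabled(field_path: str, focus: set[str]) -> bool:
--     if not focus:
--         return True
--     # dot-prefixes of field_path (every field_path[:k] with field_path[k]=='.', plus field_path itself)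
--     prefixes = {field_path}
--     for k, ch in enumerate(field_path):
--         if ch == ".":
--             prefixes.add(field_path[:k])
--     if focus & prefixes:
--         return True
--     return any(t.startswith(field_path + ".") for t in focus)
-- ===== Notes on version B (the rewrite author's own statement) =====
-- stated objective: alternative
-- what changed: A's single loop testing three conditions per focus target is replaced by building the set of dot-prefixes of field_path once, answering equality and prefix-of-field_path cases by a set intersection with focus, and a single residual pass testing only the extension condition t.startswith(field_path + '.').
import Mathlib
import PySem

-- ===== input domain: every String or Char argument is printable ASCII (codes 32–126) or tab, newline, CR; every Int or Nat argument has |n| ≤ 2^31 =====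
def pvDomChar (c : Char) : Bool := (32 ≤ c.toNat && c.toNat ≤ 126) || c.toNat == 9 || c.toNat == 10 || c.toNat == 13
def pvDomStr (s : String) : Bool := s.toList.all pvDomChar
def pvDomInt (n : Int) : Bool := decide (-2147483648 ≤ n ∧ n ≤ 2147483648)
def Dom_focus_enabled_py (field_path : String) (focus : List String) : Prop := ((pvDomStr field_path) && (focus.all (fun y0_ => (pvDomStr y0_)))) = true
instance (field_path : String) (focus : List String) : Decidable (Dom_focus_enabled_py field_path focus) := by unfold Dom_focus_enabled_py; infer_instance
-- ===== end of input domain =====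

-- B replaces A's three-condition scan by a dot-prefix set intersection plus one residual
-- single-condition pass (objective: alternative decomposition; same asymptotic cost).

-- ===== PORT A =====
-- 'for target in focus: three early-return tests' (a disjunction over a set, so iteration order is immaterial)
def focusLoopA (field_path : String) : List String → Bool
  | [] => false
  | target :: rest =>
      if field_path == target then true
      else if PySem.Chars.startswith field_path.toList (target.toList ++ ['.']) then true
      else if PySem.Chars.startswith target.toList (field_path.toList ++ ['.']) then true
      else focusLoopA field_path rest

def focus_enabled_py (field_path : String) (focus : List String) : Bool :=
  if focus.isEmpty then true
  else focusLoopA field_path focus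

-- ===== PORT B =====
-- prefixes = {field_path}; for k, ch in enumerate(field_path): if ch == '.': prefixes.add(field_path[:k])
def focusPrefixes (field_path : String) : PySem.Set String :=
  (PySem.List.enumerate field_path.toList).foldl
    (fun s kc => if kc.2 == '.' then s.add (PySem.Str.slice field_path none (some kc.1)) else s)
    (PySem.Set.ofList [field_path])

def focus_enabled_py_alt (field_path : String) (focus : List String) : Bool :=
  if focus.isEmpty then true
  else if !(PySem.Set.inter focus (focusPrefixes field_path)).isEmpty then true
  else focus.any (fun t => PySem.Chars.startswith t.toList (field_path.toList ++ ['.']))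

-- ===== PRECONDITION & SPEC =====
def Spec_focus_enabled_py (field_path : String) (focus : List String) (out : Bool) : Prop := out = focus_enabled_py_alt field_path focus
instance (field_path : String) (focus : List String) (out : Bool) : Decidable (Spec_focus_enabled_py field_path focus out) := by unfold Spec_focus_enabled_py; infer_instance

-- ===== CLAIM (what is proved, stated in full; the proofs are below) =====
def Claim_equal_focus_enabled_py : Prop := ∀ (field_path : String) (focus : List String), Dom_focus_enabled_py field_path focus → Spec_focus_enabled_py field_path focus (focus_enabled_py field_path focus)

-- ===== LEMMAS AND PROOFS =====

-- A's loop is the disjunction of its three tests over the list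
theorem focusLoopA_eq_any (fp : String) (l : List String) :
    focusLoopA fp l = l.any (fun t =>
      fp == t || PySem.Chars.startswith fp.toList (t.toList ++ ['.'])
        || PySem.Chars.startswith t.toList (fp.toList ++ ['.'])) := by
  induction l with
  | nil => rfl
  | cons t rest ih =>
      simp only [focusLoopA, List.any_cons, ← ih]
      by_cases h1 : fp == t <;> by_cases h2 : PySem.Chars.startswith fp.toList (t.toList ++ ['.']) <;>
        by_cases h3 : PySem.Chars.startswith t.toList (fp.toList ++ ['.']) <;>
        simp [h1, h2, h3]

-- membership through B's conditional-add fold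
theorem mem_foldl_add_if {α β : Type} [BEq α] [LawfulBEq α] (l : List β) (p : β → Bool)
    (f : β → α) (s0 : PySem.Set α) (x : α) :
    (x ∈ l.foldl (fun s y => if p y then s.add (f y) else s) s0) ↔
      x ∈ s0 ∨ ∃ y ∈ l, p y ∧ x = f y := by
  induction l generalizing s0 with
  | nil => simp
  | cons y rest ih =>
      simp only [List.foldl_cons, List.mem_cons]
      by_cases hp : p y
      · rw [if_pos hp, ih]
        simp only [PySem.Set.mem_add]
        constructor
        · rintro ((h | rfl) | h)
          · exact Or.inl h
          · exact Or.inr ⟨y, Or.inl rfl, hp, rfl⟩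
          · obtain ⟨z, hz, hpz, rfl⟩ := h
            exact Or.inr ⟨z, Or.inr hz, hpz, rfl⟩
        · rintro (h | ⟨z, (rfl | hz), hpz, rfl⟩)
          · exact Or.inl (Or.inl h)
          · exact Or.inl (Or.inr rfl)
          · exact Or.inr ⟨z, hz, hpz, rfl⟩
      · rw [if_neg hp, ih]
        constructor
        · rintro (h | ⟨z, hz, hpz, rfl⟩)
          · exact Or.inl h
          · exact Or.inr ⟨z, Or.inr hz, hpz, rfl⟩
        · rintro (h | ⟨z, (rfl | hz), hpz, rfl⟩)
          · exact Or.inl h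
          · exact absurd hpz hp
          · exact Or.inr ⟨z, hz, hpz, rfl⟩

-- 'cs ++ ['.'] is a prefix of L' ⟺ 'cs is L truncated at some dot'
theorem append_dot_prefix_iff (L cs : List Char) :
    (cs ++ ['.'] <+: L) ↔ ∃ k, ∃ h : k < L.length, L[k] = '.' ∧ cs = L.take k := by
  constructor
  · rintro ⟨u, hu⟩
    refine ⟨cs.length, ?_, ?_, ?_⟩
    · subst hu; simp
    · subst hu; simp
    · subst hu; simp
  · rintro ⟨k, hk, hdot, rfl⟩
    refine ⟨L.drop (k+1), ?_⟩
    have h1 : L.take k ++ ['.'] = L.take (k+1) := by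
      rw [List.take_add_one]
      simp [hk, hdot]
    rw [h1, List.take_append_drop]

-- characterisation of B's prefix set
theorem mem_focusPrefixes (fp t : String) :
    t ∈ focusPrefixes fp ↔
      fp == t ∨ PySem.Chars.startswith fp.toList (t.toList ++ ['.']) := by
  unfold focusPrefixes
  rw [mem_foldl_add_if]
  simp only [PySem.Set.mem_ofList, List.mem_singleton, PySem.List.mem_enumerate_iff,
    PySem.Chars.startswith_iff, append_dot_prefix_iff]
  constructor
  · rintro (rfl | ⟨⟨i, c⟩, ⟨k, hk, hkc⟩, hdot, rfl⟩)
    · left; simp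
    · right
      obtain ⟨h1, h2⟩ : i = (k : Int) ∧ c = fp.toList[k] := by
        simpa [Prod.ext_iff] using hkc
      subst h1; subst h2
      refine ⟨k, hk, by simpa using hdot, ?_⟩
      rw [PySem.Str.slice]
      simp [PySem.List.slice_to fp.toList (b := (k : Int)) (by positivity)]
  · rintro (h | ⟨k, hk, hdot, hcs⟩)
    · left; exact (beq_iff_eq.mp h).symm
    · right
      refine ⟨((k : Int), fp.toList[k]), ⟨k, hk, by simp⟩, by simpa using hdot, ?_⟩
      apply String.ext
      rw [PySem.Str.slice]
      simp [PySem.List.slice_to fp.toList (b := (k : Int)) (by positivity), hcs]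

-- B's intersection-nonempty test as an existential
theorem inter_nonempty_iff (focus : List String) (P : PySem.Set String) :
    (!(PySem.Set.inter focus P).isEmpty) = focus.any (fun t => decide (t ∈ P)) := by
  have h1 : (!(PySem.Set.inter focus P).isEmpty) = true ↔ ∃ t ∈ focus, t ∈ P := by
    simp [PySem.Set.inter]
  have h2 : (focus.any fun t => decide (t ∈ P)) = true ↔ ∃ t ∈ focus, t ∈ P := by simp
  exact Bool.eq_iff_iff.mpr (h1.trans h2.symm)

-- ===== VERDICT (by name: the statement is the Claim_ definition above) =====
theorem focus_enabled_py_spec : Claim_equal_focus_enabled_py := by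
  intro fp focus _
  unfold Spec_focus_enabled_py focus_enabled_py focus_enabled_py_alt
  by_cases he : focus.isEmpty
  · rw [if_pos he, if_pos he]
  · rw [if_neg he, if_neg he, focusLoopA_eq_any, inter_nonempty_iff]
    by_cases hx : focus.any (fun t => decide (t ∈ focusPrefixes fp)) = true
    · rw [if_pos hx]
      rw [List.any_eq_true] at hx ⊢
      obtain ⟨t, ht, hmem⟩ := hx
      refine ⟨t, ht, ?_⟩
      rcases (mem_focusPrefixes fp t).mp (of_decide_eq_true hmem) with h | h <;> simp [h]
    · rw [if_neg hx]
      rw [Bool.not_eq_true, List.any_eq_false] at hx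
      apply Bool.eq_iff_iff.mpr
      simp only [List.any_eq_true]
      constructor
      · rintro ⟨t, ht, hc⟩
        refine ⟨t, ht, ?_⟩
        have hnot := hx t ht
        simp only [decide_eq_true_eq, mem_focusPrefixes] at hnot
        rw [not_or] at hnot
        simp only [Bool.or_eq_true] at hc
        rcases hc with (h | h) | h
        · exact absurd h hnot.1
        · exact absurd h hnot.2
        · exact h
      · rintro ⟨t, ht, hc⟩
        exact ⟨t, ht, by simp [hc]⟩
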